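-- pv_equiv track=rewrite | github.com/voicetreelab/voicetree | backend/markdown_tree_manager/markdown_to_tree/comprehensive_parser.py | extract_title_summary_and_content
-- ===== SOURCE A (Python) =====
-- def extract_title_summary_and_content(markdown_content: str) -> tuple[str, str, str]:
--     """
--     Extract title, summary, and main content from markdown after frontmatter.
--
--     Title is the first heading (# or any level).
--     Summary is the first ### heading after the title.
--     Content is everything else before the links section.
--
--     Args:
--         markdown_content: Markdown content after frontmatter
--
--     Returns:
--         Tuple of (title, summary, main_content)
--     """
--     lines = markdown_content.strip().split('\n')
--     title = "Untitled"
--     summary = ""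
--     content_lines = []
--     found_title = False
--     found_summary = False
--
--     for line in lines:
--         stripped = line.strip()
--         # Check if line is a title (first heading of any level)
--         if stripped.startswith('#') and not found_title:
--             title = stripped.lstrip('#').strip()
--             found_title = True
--             # Skip the title line from content
--             continue
--         # Check if line is a summary (## or ### heading after title)
--         elif stripped.startswith('##') and not found_summary:
--             summary = stripped.lstrip('#').strip()
--             found_summary = True
--             # Skip the summary line from content
--             continue
--         elif stripped == '-----------------':
--             # Stop before the links section
--             break
--         else:
--             content_lines.append(line)
--
--     # Join content lines
--     content = '\n'.join(content_lines).strip()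
--
--     return title, summary, content
-- ===== SOURCE B (Python) =====
-- _SEP = '-----------------'
--
--
-- def _take_until_sep(lines):
--     """Lines before the first separator line (all of them if no separator)."""
--     window = []
--     for line in lines:
--         if line.strip() == _SEP:
--             return window
--         window.append(line)
--     return window
--
--
-- def _split_first(lines, prefix):
--     """Split at the first line whose stripped form starts with prefix:
--     (lines before it, that line or None, lines after it)."""
--     for i, line in enumerate(lines):
--         if line.strip().startswith(prefix):
--             return lines[:i], line, lines[i + 1:]
--     return lines, None, []
--
--
-- def extract_title_summary_and_content(markdown_content: str) -> tuple[str, str, str]: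
--     window = _take_until_sep(markdown_content.strip().split('\n'))
--     before, title_line, after = _split_first(window, '#')
--     title = title_line.strip().lstrip('#').strip() if title_line is not None else 'Untitled'
--     mid, summary_line, rest = _split_first(after, '##')
--     summary = summary_line.strip().lstrip('#').strip() if summary_line is not None else ''
--     content = '\n'.join(before + mid + rest).strip()
--     return title, summary, content
-- ===== Notes on version B (the rewrite author's own statement) =====
-- stated objective: alternative
-- what changed: A's single stateful loop with found_title/found_summary flags and a break is replaced by a list decomposition: cut the line list at the first separator line, split out the first heading line (title), then split out the first double-hash heading line after it (summary), and join the remaining lines as content.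
import Mathlib
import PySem

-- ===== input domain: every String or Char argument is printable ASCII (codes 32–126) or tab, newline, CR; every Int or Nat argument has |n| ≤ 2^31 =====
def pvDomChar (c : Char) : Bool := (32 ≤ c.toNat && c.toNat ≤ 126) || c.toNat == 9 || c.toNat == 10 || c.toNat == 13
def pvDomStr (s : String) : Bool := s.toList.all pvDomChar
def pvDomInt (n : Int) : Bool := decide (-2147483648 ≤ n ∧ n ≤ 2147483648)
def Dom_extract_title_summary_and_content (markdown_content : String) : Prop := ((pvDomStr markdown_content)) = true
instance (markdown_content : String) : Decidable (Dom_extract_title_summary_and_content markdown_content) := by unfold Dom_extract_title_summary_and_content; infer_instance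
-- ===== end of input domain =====

-- B replaces A's stateful flag-driven loop by a list decomposition (cut at the separator,
-- split out the title line, split out the summary line); same cost, different structure ("alternative").

-- the separator line, as a list of chars
def pvSepC : List Char := "-----------------".toList

-- stripped.lstrip('#').strip() — lstrip with the single char '#' is dropWhile (· == '#'), exact
def pvHeadingText (l : List Char) : List Char :=
  PySem.Chars.strip ((PySem.Chars.strip l).dropWhile (· == '#'))

-- ===== PORT A =====
-- A's for-loop with break: structural recursion over lines carrying
-- (found_title, found_summary, title, summary, content_lines)
def pvA_loop : List (List Char) → Bool → Bool → List Char → List Char → List (List Char) →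
    List Char × List Char × List (List Char)
  | [], _, _, t, s, acc => (t, s, acc)
  | line :: rest, ft, fs, t, s, acc =>
    let st := PySem.Chars.strip line
    if PySem.Chars.startswith st ['#'] && !ft then
      pvA_loop rest true fs (pvHeadingText line) s acc
    else if PySem.Chars.startswith st ['#', '#'] && !fs then
      pvA_loop rest ft true t (pvHeadingText line) acc
    else if st == pvSepC then (t, s, acc)
    else pvA_loop rest ft fs t s (acc ++ [line])

def extract_title_summary_and_content (markdown_content : String) : String × String × String :=
  let lines := PySem.Chars.splitOn (PySem.Chars.strip markdown_content.toList) ['\n']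
  let r := pvA_loop lines false false "Untitled".toList [] []
  (String.ofList r.1, String.ofList r.2.1,
   String.ofList (PySem.Chars.strip (PySem.Chars.join ['\n'] r.2.2)))

-- ===== PORT B =====
-- _take_until_sep
def pvTakeUntilSep : List (List Char) → List (List Char)
  | [] => []
  | line :: rest =>
    if PySem.Chars.strip line == pvSepC then []
    else line :: pvTakeUntilSep rest

-- _split_first: (lines before the first match, the matching line or none, lines after it)
def pvSplitFirst (pre : List Char) : List (List Char) →
    List (List Char) × Option (List Char) × List (List Char)
  | [] => ([], none, [])
  | line :: rest =>
    if PySem.Chars.startswith (PySem.Chars.strip line) pre then ([], some line, rest)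
    else
      let r := pvSplitFirst pre rest
      (line :: r.1, r.2.1, r.2.2)

def extract_title_summary_and_content_alt (markdown_content : String) : String × String × String :=
  let window := pvTakeUntilSep (PySem.Chars.splitOn (PySem.Chars.strip markdown_content.toList) ['\n'])
  let r1 := pvSplitFirst ['#'] window
  let title := match r1.2.1 with
    | some l => pvHeadingText l
    | none => "Untitled".toList
  let r2 := pvSplitFirst ['#', '#'] r1.2.2
  let summary := match r2.2.1 with
    | some l => pvHeadingText l
    | none => []
  (String.ofList title, String.ofList summary,
   String.ofList (PySem.Chars.strip (PySem.Chars.join ['\n'] (r1.1 ++ (r2.1 ++ r2.2.2)))))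

-- ===== PRECONDITION & SPEC =====
def Spec_extract_title_summary_and_content (markdown_content : String) (out : String × String × String) : Prop := out = extract_title_summary_and_content_alt markdown_content
instance (markdown_content : String) (out : String × String × String) : Decidable (Spec_extract_title_summary_and_content markdown_content out) := by unfold Spec_extract_title_summary_and_content; infer_instance

-- ===== CLAIM (what is proved, stated in full; the proofs are below) =====
def Claim_equal_extract_title_summary_and_content : Prop := ∀ (markdown_content : String), Dom_extract_title_summary_and_content markdown_content → Spec_extract_title_summary_and_content markdown_content (extract_title_summary_and_content markdown_content)

-- ===== LEMMAS AND PROOFS =====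

-- content lines accumulate on the right of acc
theorem pvA_loop_acc (ls : List (List Char)) (ft fs : Bool) (t s : List Char)
    (acc : List (List Char)) :
    pvA_loop ls ft fs t s acc =
      ((pvA_loop ls ft fs t s []).1, (pvA_loop ls ft fs t s []).2.1,
        acc ++ (pvA_loop ls ft fs t s []).2.2) := by
  induction ls generalizing ft fs t s acc with
  | nil => simp [pvA_loop]
  | cons line rest ih =>
    simp only [pvA_loop, List.nil_append]
    split_ifs with h1 h2 h3
    · exact ih ..
    · exact ih ..
    · simp
    · rw [ih ft fs t s (acc ++ [line]), ih ft fs t s [line]]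
      simp

-- the separator does not start with '#'
theorem sep_not_hash (st : List Char) (h : PySem.Chars.startswith st ['#'] = true) :
    (st == pvSepC) = false := by
  rw [PySem.Chars.startswith_iff] at h
  rcases h with ⟨tl, rfl⟩
  rw [show pvSepC = '-' :: "----------------".toList from by decide]
  simp

-- '##' prefix implies '#' prefix
theorem startswith_hh' (st : List Char)
    (h : PySem.Chars.startswith st ['#', '#'] = true) :
    PySem.Chars.startswith st ['#'] = true := by
  rw [PySem.Chars.startswith_iff] at h ⊢
  exact List.IsPrefix.trans ⟨['#'], rfl⟩ h

theorem startswith_hh (st : List Char) (h : PySem.Chars.startswith st ['#'] = false) :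
    PySem.Chars.startswith st ['#', '#'] = false := by
  by_contra hc
  rw [Bool.not_eq_false] at hc
  rw [startswith_hh' st hc] at h
  simp at h

-- stage 2: both headings found — the loop just collects lines up to the separator
theorem pvA_loop_stage2 (ls : List (List Char)) (t s : List Char) :
    pvA_loop ls true true t s [] = (t, s, pvTakeUntilSep ls) := by
  induction ls generalizing t s with
  | nil => simp [pvA_loop, pvTakeUntilSep]
  | cons line rest ih =>
    simp only [pvA_loop, pvTakeUntilSep, Bool.not_true, Bool.and_false, List.nil_append,
      if_false, Bool.false_eq_true]
    by_cases h3 : (PySem.Chars.strip line == pvSepC) = true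
    · simp [h3]
    · simp only [Bool.not_eq_true] at h3
      rw [if_neg (by simp [h3]), if_neg (by simp [h3]),
          pvA_loop_acc rest true true t s [line], ih]
      simp

-- stage 1: title found — the rest matches B's summary split of the remaining window
theorem pvA_loop_stage1 (ls : List (List Char)) (t s : List Char) :
    pvA_loop ls true false t s [] =
      (t,
       (match (pvSplitFirst ['#', '#'] (pvTakeUntilSep ls)).2.1 with
        | some l => pvHeadingText l
        | none => s),
       (pvSplitFirst ['#', '#'] (pvTakeUntilSep ls)).1 ++
         (pvSplitFirst ['#', '#'] (pvTakeUntilSep ls)).2.2) := by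
  induction ls generalizing t s with
  | nil => simp [pvA_loop, pvTakeUntilSep, pvSplitFirst]
  | cons line rest ih =>
    simp only [pvA_loop, Bool.not_true, Bool.and_false, List.nil_append, if_false,
      Bool.false_eq_true]
    by_cases h2 : PySem.Chars.startswith (PySem.Chars.strip line) ['#', '#'] = true
    · have hsep : (PySem.Chars.strip line == pvSepC) = false :=
        sep_not_hash _ (startswith_hh' _ h2)
      rw [if_pos (by simp [h2]), pvA_loop_stage2]
      simp [pvTakeUntilSep, hsep, pvSplitFirst, h2]
    · simp only [Bool.not_eq_true] at h2
      by_cases h3 : (PySem.Chars.strip line == pvSepC) = true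
      · simp [h2, h3, pvTakeUntilSep, pvSplitFirst]
      · simp only [Bool.not_eq_true] at h3
        rw [if_neg (by simp [h2]), if_neg (by simp [h3]),
            pvA_loop_acc rest true false t s [line], ih]
        simp [pvTakeUntilSep, h3, pvSplitFirst, h2]

-- stage 0: the whole loop equals B's three-way decomposition
theorem pvA_loop_main (ls : List (List Char)) :
    pvA_loop ls false false "Untitled".toList [] [] =
      ((match (pvSplitFirst ['#'] (pvTakeUntilSep ls)).2.1 with
        | some l => pvHeadingText l
        | none => "Untitled".toList),
       (match (pvSplitFirst ['#', '#'] (pvSplitFirst ['#'] (pvTakeUntilSep ls)).2.2).2.1 with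
        | some l => pvHeadingText l
        | none => ([] : List Char)),
       (pvSplitFirst ['#'] (pvTakeUntilSep ls)).1 ++
         ((pvSplitFirst ['#', '#'] (pvSplitFirst ['#'] (pvTakeUntilSep ls)).2.2).1 ++
           (pvSplitFirst ['#', '#'] (pvSplitFirst ['#'] (pvTakeUntilSep ls)).2.2).2.2)) := by
  induction ls with
  | nil => simp [pvA_loop, pvTakeUntilSep, pvSplitFirst]
  | cons line rest ih =>
    simp only [pvA_loop, Bool.not_false, Bool.and_true, List.nil_append]
    by_cases h1 : PySem.Chars.startswith (PySem.Chars.strip line) ['#'] = true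
    · have hsep := sep_not_hash _ h1
      rw [if_pos h1, pvA_loop_stage1]
      simp [pvTakeUntilSep, hsep, pvSplitFirst, h1]
    · simp only [Bool.not_eq_true] at h1
      have h2 := startswith_hh _ h1
      by_cases h3 : (PySem.Chars.strip line == pvSepC) = true
      · simp [h1, h2, h3, pvTakeUntilSep, pvSplitFirst]
      · simp only [Bool.not_eq_true] at h3
        rw [if_neg (by simp [h1]), if_neg (by simp [h2]), if_neg (by simp [h3]),
            pvA_loop_acc rest false false "Untitled".toList [] [line], ih]
        simp [pvTakeUntilSep, h3, pvSplitFirst, h1]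

-- ===== VERDICT (by name: the statement is the Claim_ definition above) =====
theorem extract_title_summary_and_content_spec : Claim_equal_extract_title_summary_and_content := by
  intro markdown_content _
  unfold Spec_extract_title_summary_and_content
  unfold extract_title_summary_and_content extract_title_summary_and_content_alt
  simp only [pvA_loop_main]
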